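-- pv_equiv track=rewrite | github.com/jcstlo/aoc-2024 | day_09/part2.py | separate_free_space
-- ===== SOURCE A (Python) =====
-- def separate_free_space(nums: list[int]) -> list[(int, int)]:
--     # returns list[(size, start_idx)]
--     start_idx = 0
--     spaces = []
--     for idx, num in enumerate(nums):
--         if idx % 2 == 1 and num > 0:
--             spaces.append((num, start_idx))
--         start_idx += num
--     return spaces
-- ===== SOURCE B (Python) =====
-- def separate_free_space(nums: list[int]) -> list[(int, int)]:
--     # returns list[(size, start_idx)]
--     # Work back-to-front: drop a trailing file entry (it has no free block
--     # after it), precompute the total size of the rest once, then scan the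
--     # odd indices right-to-left, peeling each (file, free) pair off the
--     # running end offset; the collected pairs are reversed at the end.
--     n = len(nums) - len(nums) % 2
--     end = sum(nums[:n])
--     out = []
--     for i in reversed(range(1, n, 2)):
--         free = nums[i]
--         if free > 0:
--             out.append((free, end - free))
--         end -= free + nums[i - 1]
--     out.reverse()
--     return out
-- ===== Notes on version B (the rewrite author's own statement) =====
-- stated objective: alternative
-- what changed: B scans the disk map right-to-left over the odd indices only, recovering each free block's start by subtracting sizes from a precomputed total end offset and reversing the collected list at the end, instead of A's left-to-right enumerate loop with a forward-accumulating start offset and a per-index parity test.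
import Mathlib
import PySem

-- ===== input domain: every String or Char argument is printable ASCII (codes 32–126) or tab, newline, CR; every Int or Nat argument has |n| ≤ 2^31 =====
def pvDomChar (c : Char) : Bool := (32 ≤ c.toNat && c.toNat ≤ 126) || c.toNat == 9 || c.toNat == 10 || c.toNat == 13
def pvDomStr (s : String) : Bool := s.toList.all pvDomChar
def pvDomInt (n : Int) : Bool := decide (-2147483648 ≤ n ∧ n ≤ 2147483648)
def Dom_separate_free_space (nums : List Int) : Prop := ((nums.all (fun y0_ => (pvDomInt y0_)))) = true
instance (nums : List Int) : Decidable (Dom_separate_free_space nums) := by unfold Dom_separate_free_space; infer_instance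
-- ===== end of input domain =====

-- B scans the disk map right-to-left over the odd indices only, subtracting sizes from a
-- precomputed total end offset and reversing the collected list at the end, instead of A's
-- left-to-right enumerate loop with a forward start accumulator (objective: alternative).

-- ===== PORT A =====
def separate_free_space (nums : List Int) : List (Int × Int) :=
  ((PySem.List.enumerate nums 0).foldl
    (fun (st : Int × List (Int × Int)) p =>
      (st.1 + p.2,
       if PySem.Int.mod p.1 2 = 1 ∧ p.2 > 0 then st.2 ++ [(p.2, st.1)] else st.2))
    (0, [])).2

-- ===== PORT B =====
-- transliteration of Source B: n = len - len % 2; end = sum(nums[:n]); right-to-left loop over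
-- reversed(range(1, n, 2)); nums[i] / nums[i-1] are always in range, so pyGetD is exact.
def separate_free_space_alt (nums : List Int) : List (Int × Int) :=
  let n : Int := (nums.length : Int) - PySem.Int.mod (nums.length : Int) 2
  let endv : Int := (PySem.List.slice nums none (some n)).sum
  (((PySem.List.pyRange 1 n 2).reverse).foldl
    (fun (st : Int × List (Int × Int)) i =>
      let free := PySem.List.pyGetD nums i 0
      (st.1 - (free + PySem.List.pyGetD nums (i - 1) 0),
       if free > 0 then st.2 ++ [(free, st.1 - free)] else st.2))
    (endv, [])).2.reverse

-- ===== PRECONDITION & SPEC =====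
def Spec_separate_free_space (nums : List Int) (out : List (Int × Int)) : Prop := out = separate_free_space_alt nums
instance (nums : List Int) (out : List (Int × Int)) : Decidable (Spec_separate_free_space nums out) := by unfold Spec_separate_free_space; infer_instance

-- ===== CLAIM (what is proved, stated in full; the proofs are below) =====
def Claim_equal_separate_free_space : Prop := ∀ (nums : List Int), Dom_separate_free_space nums → Spec_separate_free_space nums (separate_free_space nums)

-- ===== LEMMAS AND PROOFS =====

-- common characterisation: the free-space pairs of a disk map starting at offset pos
def pairSpec : List Int → Int → List (Int × Int)
  | [], _ => []
  | [_], _ => []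
  | a :: b :: t, pos => (if b > 0 then [(b, pos + a)] else []) ++ pairSpec t (pos + (a + b))

theorem foldA_eq (xs : List Int) (s : Int) (hs : s % 2 = 0) (pos : Int)
    (spaces : List (Int × Int)) :
    (PySem.List.enumerate xs s).foldl
      (fun (st : Int × List (Int × Int)) p =>
        (st.1 + p.2,
         if PySem.Int.mod p.1 2 = 1 ∧ p.2 > 0 then st.2 ++ [(p.2, st.1)] else st.2))
      (pos, spaces)
    = (pos + xs.sum, spaces ++ pairSpec xs pos) := by
  induction xs, pos using pairSpec.induct generalizing s spaces with
  | case1 pos => simp [PySem.List.enumerate_nil, pairSpec]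
  | case2 a pos =>
    have h1 : ¬ s % 2 = 1 := by omega
    simp [PySem.List.enumerate_cons, PySem.List.enumerate_nil, pairSpec, h1]
  | case3 a b t pos ih =>
    have h1 : PySem.Int.mod s 2 ≠ 1 := by
      rw [PySem.Int.mod_eq_emod_of_pos (by omega)]; omega
    have h2 : PySem.Int.mod (s + 1) 2 = 1 := by
      rw [PySem.Int.mod_eq_emod_of_pos (by omega)]; omega
    rw [PySem.List.enumerate_cons, PySem.List.enumerate_cons, List.foldl_cons,
      List.foldl_cons]
    simp only [h1, h2, false_and, if_false, true_and]
    have e : pos + a + b = pos + (a + b) := by ring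
    rw [e, ih (s + 1 + 1) (by omega)]
    by_cases hb : b > 0 <;> simp [pairSpec, hb] <;> ring

-- a trailing lone file entry contributes no free block
theorem pairSpec_append_singleton (t : List Int) (x : Int) (pos : Int)
    (ht : t.length % 2 = 0) : pairSpec (t ++ [x]) pos = pairSpec t pos := by
  induction t, pos using pairSpec.induct with
  | case1 pos => simp [pairSpec]
  | case2 a pos => simp at ht
  | case3 a b t pos ih =>
    simp only [List.cons_append, pairSpec]
    rw [ih (by simp at ht; omega)]

-- appending one (file, free) pair to an even-length disk map
theorem pairSpec_append_pair (t : List Int) (a b : Int) (pos : Int)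
    (ht : t.length % 2 = 0) :
    pairSpec (t ++ [a, b]) pos
      = pairSpec t pos ++ (if b > 0 then [(b, pos + t.sum + a)] else []) := by
  induction t, pos using pairSpec.induct with
  | case1 pos => simp [pairSpec]
  | case2 x pos => simp at ht
  | case3 x y t pos ih =>
    simp only [List.cons_append, pairSpec]
    rw [ih (by simp at ht; omega)]
    simp only [List.sum_cons, List.append_assoc]
    have e : pos + (x + y) + t.sum + a = pos + (x + (y + t.sum)) + a := by ring
    rw [e]

-- range(1, m, 2) over an even bound grows on the right by two
theorem pyRange_two_succ (m : Nat) (hm : m % 2 = 0) :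
    PySem.List.pyRange 1 ((m : Int) + 2) 2
      = PySem.List.pyRange 1 (m : Int) 2 ++ [(m : Int) + 1] := by
  rw [PySem.List.pyRange_of_pos 1 ((m : Int) + 2) (by omega),
    PySem.List.pyRange_of_pos 1 (m : Int) (by omega)]
  have h1 : (((m : Int) + 2 - 1 + 2 - 1) / 2).toNat = m / 2 + 1 := by omega
  have h2 : (if (1 : Int) < m then (((m : Int) - 1 + 2 - 1) / 2).toNat else 0) = m / 2 := by
    split <;> omega
  rw [if_pos (by omega), h1, h2, List.range_succ, List.map_append]
  simp only [List.map_cons, List.map_nil]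
  congr 2
  omega

-- the B loop over an even-length prefix produces the reversed pairSpec
theorem foldB_eq (nums : List Int) (m : Nat) (hm : m % 2 = 0) (hle : m ≤ nums.length)
    (out : List (Int × Int)) :
    ((PySem.List.pyRange 1 (m : Int) 2).reverse).foldl
      (fun (st : Int × List (Int × Int)) i =>
        let free := PySem.List.pyGetD nums i 0
        (st.1 - (free + PySem.List.pyGetD nums (i - 1) 0),
         if free > 0 then st.2 ++ [(free, st.1 - free)] else st.2))
      ((nums.take m).sum, out)
    = (0, out ++ (pairSpec (nums.take m) 0).reverse) := by
  induction m using Nat.strong_induction_on generalizing out with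
  | _ m ih =>
    match m, hm with
    | 0, _ => simp [PySem.List.pyRange, pairSpec]
    | (m' + 2), hm =>
      have hm' : m' % 2 = 0 := by omega
      have h1 : m' < nums.length := by omega
      have h2 : m' + 1 < nums.length := by omega
      have hcast : ((m' : Int) + 2) = ((m' + 2 : Nat) : Int) := by push_cast; ring
      rw [← hcast, pyRange_two_succ m' hm', List.reverse_append, List.reverse_singleton,
        List.singleton_append, List.foldl_cons]
      have hga : PySem.List.pyGetD nums ((m' : Int) + 1) 0 = nums[m' + 1] := by
        have : ((m' : Int) + 1) = ((m' + 1 : Nat) : Int) := by push_cast; ring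
        rw [this, PySem.List.pyGetD_natCast, List.getD_eq_getElem _ _ h2]
      have hgb : PySem.List.pyGetD nums ((m' : Int) + 1 - 1) 0 = nums[m'] := by
        have : ((m' : Int) + 1 - 1) = ((m' : Nat) : Int) := by ring
        rw [this, PySem.List.pyGetD_natCast, List.getD_eq_getElem _ _ h1]
      have htake : nums.take (m' + 2) = nums.take m' ++ [nums[m'], nums[m' + 1]] := by
        rw [List.take_add_one, List.take_add_one,
          List.getElem?_eq_getElem h1, List.getElem?_eq_getElem h2]
        simp only [Option.toList_some, List.append_assoc, List.singleton_append]
      simp only [hga, hgb, htake, List.sum_append, List.sum_cons, List.sum_nil]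
      have hsum1 : (nums.take m').sum + (nums[m'] + (nums[m' + 1] + 0))
          - (nums[m' + 1] + nums[m']) = (nums.take m').sum := by ring
      have hsum2 : (nums.take m').sum + (nums[m'] + (nums[m' + 1] + 0)) - nums[m' + 1]
          = 0 + (nums.take m').sum + nums[m'] := by ring
      rw [hsum1, hsum2]
      rw [ih m' (by omega) hm' (by omega)]
      rw [pairSpec_append_pair _ _ _ _ (by simp; omega)]
      by_cases hb : nums[m' + 1] > 0 <;> simp [hb]

-- ===== VERDICT (by name: the statement is the Claim_ definition above) =====
theorem separate_free_space_spec : Claim_equal_separate_free_space := by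
  intro nums _
  unfold Spec_separate_free_space separate_free_space separate_free_space_alt
  rw [foldA_eq nums 0 (by norm_num)]
  set L := nums.length with hL
  have hmod : PySem.Int.mod (L : Int) 2 = ((L % 2 : Nat) : Int) := by
    exact_mod_cast PySem.Int.mod_natCast L 2
  set m : Nat := L - L % 2 with hm
  have hn : (L : Int) - PySem.Int.mod (L : Int) 2 = (m : Int) := by
    rw [hmod]; omega
  have hslice : PySem.List.slice nums none (some ((m : Nat) : Int)) = nums.take m :=
    PySem.List.slice_to_natCast nums m
  simp only [hn, hslice]
  rw [foldB_eq nums m (by omega) (by omega)]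
  simp only [List.nil_append, List.reverse_reverse]
  -- pairSpec ignores a trailing lone entry
  by_cases hpar : L % 2 = 0
  · have hmL : m = L := by omega
    rw [hmL, hL, List.take_length]
  · have hL1 : 1 ≤ L := by omega
    have hmL : m = L - 1 := by omega
    have hlt : L - 1 < nums.length := by omega
    have hsplit : nums = nums.take (L - 1) ++ [nums[L - 1]] := by
      conv_lhs => rw [← List.take_length (l := nums), ← hL,
        show L = (L - 1) + 1 by omega]
      rw [List.take_add_one, List.getElem?_eq_getElem hlt]
      simp only [Option.toList_some]
    rw [hmL]
    conv_lhs => rw [hsplit]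
    rw [pairSpec_append_singleton _ _ _ (by simp; omega)]
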